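-- pv_equiv track=rewrite | github.com/PEROPOROBTANTE/F.A.R.F.A.N-MECHANISTIC_POLICY_PIPELINE_FINAL | src/farfan_pipeline/core/orchestrator/memory_safety.py | truncate_dict
-- ===== SOURCE A (Python) =====
-- from typing import Any, TypeVar
--
-- def truncate_dict(d: dict[str, Any], max_keys: int) -> dict[str, Any]:
--     """Truncate dictionary to max_keys, preserving most important keys."""
--     if len(d) <= max_keys:
--         return d
--
--     priority_keys = ["id", "name", "type", "label", "value", "score", "confidence"]
--
--     result = {}
--     for key in priority_keys:
--         if key in d and len(result) < max_keys:
--             result[key] = d[key]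
--
--     remaining = max_keys - len(result)
--     for key in d:
--         if key not in result and remaining > 0:
--             result[key] = d[key]
--             remaining -= 1
--
--     return result
-- ===== SOURCE B (Python) =====
-- def truncate_dict(d: dict, max_keys: int) -> dict:
--     """Truncate dictionary to max_keys, preserving most important keys."""
--     if len(d) <= max_keys:
--         return d
--
--     priority_keys = ["id", "name", "type", "label", "value", "score", "confidence"]
--
--     # Rank every key with a single integer: a priority key sorts at its index in
--     # priority_keys; any other key sorts after all of them, in original dict order.
--     rank = {k: i for i, k in enumerate(priority_keys)}
--     pos = {k: i for i, k in enumerate(d)}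
--     keep = sorted(d, key=lambda k: rank.get(k, len(priority_keys) + pos[k]))[:max(max_keys, 0)]
--     return {k: d[k] for k in keep}
-- ===== Notes on version B (the rewrite author's own statement) =====
-- stated objective: alternative
-- what changed: A's two interleaved dict-filling loops with a 'remaining' counter and key-in-result membership tests are replaced by sort-based selection: each key gets a single integer rank (its index in the priority list, or priority-count plus its original position), and the result is the dict comprehension over sorted(d, key=rank)[:max_keys].
import Mathlib
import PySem

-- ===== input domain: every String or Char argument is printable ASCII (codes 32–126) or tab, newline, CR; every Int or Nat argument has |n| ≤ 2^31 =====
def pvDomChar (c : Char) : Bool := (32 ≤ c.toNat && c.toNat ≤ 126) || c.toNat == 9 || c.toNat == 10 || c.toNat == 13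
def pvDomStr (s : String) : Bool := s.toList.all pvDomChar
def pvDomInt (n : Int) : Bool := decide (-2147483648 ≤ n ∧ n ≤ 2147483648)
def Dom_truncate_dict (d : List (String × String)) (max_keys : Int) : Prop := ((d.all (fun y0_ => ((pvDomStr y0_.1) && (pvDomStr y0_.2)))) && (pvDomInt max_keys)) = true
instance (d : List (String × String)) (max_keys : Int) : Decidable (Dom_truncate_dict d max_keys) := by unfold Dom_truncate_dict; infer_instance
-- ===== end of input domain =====

-- B replaces A's two interleaved dict-filling loops and 'remaining' counter by a sort-based
-- selection: every key gets one integer rank (priority index, or priority-count + original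
-- position) and the kept keys are sorted(d, key=rank)[:max_keys] (objective: alternative).


-- ===== PORT A =====
def truncate_dict (d : List (String × String)) (max_keys : Int) : List (String × String) :=
  if (d.length : Int) ≤ max_keys then d
  else
    let dd : PySem.Dict String String := PySem.Dict.mk d
    let priority_keys : List String := ["id", "name", "type", "label", "value", "score", "confidence"]
    let result : PySem.Dict String String :=
      priority_keys.foldl (fun result key =>
        if dd.contains key = true ∧ (result.size : Int) < max_keys then
          match dd.get? key with
          | some v => result.insert key v
          | none => result
        else result) PySem.Dict.empty
    let st :=
      d.foldl (fun (st : PySem.Dict String String × Int) kv =>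
        if st.1.contains kv.1 = false ∧ 0 < st.2 then
          match dd.get? kv.1 with
          | some v => (st.1.insert kv.1 v, st.2 - 1)
          | none => st
        else st) (result, max_keys - (result.size : Int))
    st.1.items

-- ===== PORT B =====
def truncate_dict_alt (d : List (String × String)) (max_keys : Int) : List (String × String) :=
  if (d.length : Int) ≤ max_keys then d
  else
    let dd : PySem.Dict String String := PySem.Dict.mk d
    let priority_keys : List String := ["id", "name", "type", "label", "value", "score", "confidence"]
    let rank : PySem.Dict String Int :=
      PySem.Dict.mk ((PySem.List.enumerate priority_keys).map (fun p => (p.2, p.1)))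
    let pos : PySem.Dict String Int :=
      PySem.Dict.mk ((PySem.List.enumerate d).map (fun p => (p.2.1, p.1)))
    let keep : List String :=
      PySem.List.slice
        (PySem.List.sorted dd.keys
          (fun k => rank.getD k ((priority_keys.length : Int) + pos.getD k 0)))
        none (some (max max_keys 0))
    (keep.foldl (fun (r : PySem.Dict String String) k =>
        match dd.get? k with
        | some v => r.insert k v
        | none => r) PySem.Dict.empty).items

-- ===== PRECONDITION & SPEC =====
-- Pre_ requires the association list to have pairwise-distinct keys: the Python argument is a
-- dict, and only duplicate-free lists represent a dict; no actual dict input is excluded.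
def Pre_truncate_dict (d : List (String × String)) (max_keys : Int) : Prop :=
  (d.map Prod.fst).Nodup
instance (d : List (String × String)) (max_keys : Int) : Decidable (Pre_truncate_dict d max_keys) := by unfold Pre_truncate_dict; infer_instance

def pvWitness_truncate_dict : (List (String × String)) × Int := ([("id", "1"), ("a", "2")], 1)

def Spec_truncate_dict (d : List (String × String)) (max_keys : Int) (out : List (String × String)) : Prop := out = truncate_dict_alt d max_keys
instance (d : List (String × String)) (max_keys : Int) (out : List (String × String)) : Decidable (Spec_truncate_dict d max_keys out) := by unfold Spec_truncate_dict; infer_instance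

-- ===== CLAIM (what is proved, stated in full; the proofs are below) =====
def Claim_equal_truncate_dict : Prop := ∀ (d : List (String × String)) (max_keys : Int), Dom_truncate_dict d max_keys → Pre_truncate_dict d max_keys → Spec_truncate_dict d max_keys (truncate_dict d max_keys)

-- ===== LEMMAS AND PROOFS =====

-- the value list built for a list of keys, all looked up in dd
def pvBuild (dd : PySem.Dict String String) (ks : List String) : List (String × String) :=
  ks.map (fun k => (k, dd.getD k ""))

-- a nodup list is strictly increasing under idxOf
theorem pvPairwiseIdxOf (l : List String) (hnd : l.Nodup) :
    l.Pairwise (fun a b => l.idxOf a < l.idxOf b) := by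
  induction l with
  | nil => exact List.Pairwise.nil
  | cons x t ih =>
    have hx : x ∉ t := (List.nodup_cons.mp hnd).1
    have ht : t.Nodup := (List.nodup_cons.mp hnd).2
    refine List.Pairwise.cons ?_ ?_
    · intro b hb
      have hbx : b ≠ x := fun h => hx (h ▸ hb)
      rw [List.idxOf_cons_self, List.idxOf_cons_ne _ (fun h => hbx h.symm)]
      omega
    · refine (ih ht).imp_of_mem ?_
      intro a b ha hb h
      have hax : a ≠ x := fun he => hx (he ▸ ha)
      have hbx : b ≠ x := fun he => hx (he ▸ hb)
      rw [List.idxOf_cons_ne _ (fun h => hax h.symm), List.idxOf_cons_ne _ (fun h => hbx h.symm)]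
      omega

-- the dict {f(e): i for i, e in enumerate(l, s)} looked up at a key
theorem pvEnumGet {α : Type} (f : α → String) (l : List α) (s : Int) (k : String)
    (hnd : (l.map f).Nodup) (hk : k ∈ l.map f) :
    (PySem.Dict.mk ((PySem.List.enumerate l s).map (fun p => (f p.2, p.1)))).get? k
      = some (s + ((l.map f).idxOf k : Int)) := by
  induction l generalizing s with
  | nil => simp at hk
  | cons x t ih =>
    rw [PySem.List.enumerate_cons]
    simp only [List.map_cons]
    rw [PySem.Dict.get?_mk_cons]
    by_cases hkx : f x = k
    · subst hkx
      simp [List.idxOf_cons_self]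
    · rw [if_neg (by simpa using hkx)]
      have hkt : k ∈ t.map f := by
        rcases List.mem_cons.mp hk with h | h
        · exact absurd h.symm hkx
        · exact h
      rw [ih (s + 1) ((List.nodup_cons.mp (by simpa using hnd)).2) hkt]
      rw [List.idxOf_cons_ne _ (fun h => hkx h)]
      congr 1
      push_cast
      ring

theorem pvEnumGetNone {α : Type} (f : α → String) (l : List α) (s : Int) (k : String)
    (hk : k ∉ l.map f) :
    (PySem.Dict.mk ((PySem.List.enumerate l s).map (fun p => (f p.2, p.1)))).get? k = none := by
  induction l generalizing s with
  | nil => rfl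
  | cons x t ih =>
    rw [PySem.List.enumerate_cons]
    simp only [List.map_cons]
    rw [PySem.Dict.get?_mk_cons]
    have hne : ¬ f x = k := fun h => hk (by rw [List.map_cons, ← h]; exact List.mem_cons_self ..)
    rw [if_neg (by simpa using hne)]
    exact ih (s + 1) (fun h => hk (List.mem_cons_of_mem _ h))

-- B's uncapped dict-comprehension pass, characterised
theorem pvFillAll (dd : PySem.Dict String String)
    (L : List String) (res : PySem.Dict String String)
    (hc : ∀ k ∈ L, dd.contains k = true)
    (hnd : (res.keys ++ L).Nodup) :
    (L.foldl (fun (r : PySem.Dict String String) k =>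
        match dd.get? k with
        | some v => r.insert k v
        | none => r) res).items
      = res.items ++ pvBuild dd L := by
  induction L generalizing res with
  | nil => simp [pvBuild]
  | cons k L ih =>
    have hkd : dd.contains k = true := hc k (List.mem_cons_self ..)
    have hcL : ∀ x ∈ L, dd.contains x = true := fun x hx => hc x (List.mem_cons_of_mem _ hx)
    simp only [List.foldl_cons]
    obtain ⟨v, hv⟩ : ∃ v, dd.get? k = some v := by
      rcases h : dd.get? k with _ | v
      · rw [PySem.Dict.contains_eq_isSome_get?, h] at hkd; simp at hkd
      · exact ⟨v, rfl⟩
    have hknr : res.contains k = false := by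
      have : k ∉ res.keys := by
        intro hmem
        exact (List.disjoint_of_nodup_append hnd) hmem (List.mem_cons_self ..)
      simpa [PySem.Dict.contains_eq_decide_mem_keys]
    rw [hv]
    have hkeys : (res.insert k v).keys = res.keys ++ [k] :=
      PySem.Dict.keys_insert_of_not_contains _ _ hknr
    have hnd' : ((res.insert k v).keys ++ L).Nodup := by
      rw [hkeys]
      have hp : (res.keys ++ k :: L).Perm ((res.keys ++ [k]) ++ L) := by
        simp only [List.append_assoc, List.singleton_append]
        exact List.Perm.refl _
      exact hp.nodup hnd
    rw [ih (res.insert k v) hcL hnd']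
    rw [PySem.Dict.items_insert_of_not_contains _ _ hknr]
    simp [pvBuild, PySem.Dict.getD_of_get?_eq_some _ _ hv]

-- A's first loop (priority keys), characterised
theorem pvPhase1 (dd : PySem.Dict String String) (max_keys : Int)
    (ks : List String) (res : PySem.Dict String String)
    (hnd : (res.keys ++ ks.filter (fun k => dd.contains k)).Nodup) :
    (ks.foldl (fun result key =>
        if dd.contains key = true ∧ (result.size : Int) < max_keys then
          match dd.get? key with
          | some v => result.insert key v
          | none => result
        else result) res).items
      = res.items ++ pvBuild dd ((ks.filter (fun k => dd.contains k)).take (max_keys.toNat - res.size)) := by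
  induction ks generalizing res with
  | nil => simp [pvBuild]
  | cons k ks ih =>
    simp only [List.foldl_cons]
    by_cases hkd : dd.contains k = true
    · have hnd1 : (res.keys ++ k :: ks.filter (fun k => dd.contains k)).Nodup := by
        simpa [List.filter_cons, hkd] using hnd
      by_cases hlt : (res.size : Int) < max_keys
      · rw [if_pos ⟨hkd, hlt⟩]
        obtain ⟨v, hv⟩ : ∃ v, dd.get? k = some v := by
          rcases h : dd.get? k with _ | v
          · rw [PySem.Dict.contains_eq_isSome_get?, h] at hkd; simp at hkd
          · exact ⟨v, rfl⟩
        have hknr : res.contains k = false := by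
          have : k ∉ res.keys := by
            intro hmem
            exact (List.disjoint_of_nodup_append hnd1) hmem (List.mem_cons_self ..)
          simpa [PySem.Dict.contains_eq_decide_mem_keys]
        rw [hv]
        have hkeys : (res.insert k v).keys = res.keys ++ [k] :=
          PySem.Dict.keys_insert_of_not_contains _ _ hknr
        have hsz : (res.insert k v).size = res.size + 1 := by
          simp [PySem.Dict.size, PySem.Dict.items_insert_of_not_contains res v hknr]
        have hnd' : ((res.insert k v).keys ++ ks.filter (fun k => dd.contains k)).Nodup := by
          rw [hkeys]
          have hp : (res.keys ++ k :: ks.filter (fun k => dd.contains k)).Perm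
              ((res.keys ++ [k]) ++ ks.filter (fun k => dd.contains k)) := by
            simp only [List.append_assoc, List.singleton_append]
            exact List.Perm.refl _
          exact hp.nodup hnd1
        rw [ih (res.insert k v) hnd']
        have htake : max_keys.toNat - res.size = (max_keys.toNat - (res.size + 1)) + 1 := by omega
        rw [PySem.Dict.items_insert_of_not_contains res v hknr, hsz]
        simp [List.filter_cons, hkd, htake, pvBuild, PySem.Dict.getD_of_get?_eq_some _ _ hv]
      · have ht : max_keys.toNat - res.size = 0 := by omega
        have hsub : (res.keys ++ ks.filter (fun k => dd.contains k)).Nodup :=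
          List.Nodup.sublist ((List.sublist_cons_self ..).append_left res.keys) hnd1
        rw [if_neg (fun h => hlt h.2), ih res hsub]
        simp [ht, pvBuild]
    · rw [if_neg (fun h => hkd h.1)]
      have hsub : (res.keys ++ ks.filter (fun k => dd.contains k)).Nodup := by
        simpa [List.filter_cons, hkd] using hnd
      rw [ih res hsub]
      simp [List.filter_cons, hkd]

-- A's second loop (fill from d with the remaining counter), characterised
theorem pvPhase2 (dd : PySem.Dict String String) (max_keys : Int)
    (L : List (String × String)) (res : PySem.Dict String String)
    (hc : ∀ kv ∈ L, dd.contains kv.1 = true)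
    (hndL : (L.map Prod.fst).Nodup) (hndr : res.keys.Nodup) :
    (L.foldl (fun (st : PySem.Dict String String × Int) kv =>
        if st.1.contains kv.1 = false ∧ 0 < st.2 then
          match dd.get? kv.1 with
          | some v => (st.1.insert kv.1 v, st.2 - 1)
          | none => st
        else st) (res, max_keys - (res.size : Int))).1.items
      = res.items ++ pvBuild dd (((L.map Prod.fst).filter (fun k => !res.contains k)).take (max_keys.toNat - res.size)) := by
  induction L generalizing res with
  | nil => simp [pvBuild]
  | cons kv L ih =>
    simp only [List.foldl_cons, List.map_cons]
    have hndL' : (L.map Prod.fst).Nodup := (List.nodup_cons.mp hndL).2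
    have hkL : kv.1 ∉ L.map Prod.fst := (List.nodup_cons.mp hndL).1
    have hcL : ∀ x ∈ L, dd.contains x.1 = true := fun x hx => hc x (List.mem_cons_of_mem _ hx)
    by_cases hmem : res.contains kv.1 = true
    · rw [if_neg (by simp [hmem])]
      rw [ih res hcL hndL' hndr]
      simp [List.filter_cons, hmem]
    · have hmem' : res.contains kv.1 = false := by simpa using hmem
      by_cases hrem : (0 : Int) < max_keys - (res.size : Int)
      · rw [if_pos ⟨hmem', hrem⟩]
        obtain ⟨v, hv⟩ : ∃ v, dd.get? kv.1 = some v := by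
          have hkd := hc kv (List.mem_cons_self ..)
          rcases h : dd.get? kv.1 with _ | v
          · rw [PySem.Dict.contains_eq_isSome_get?, h] at hkd; simp at hkd
          · exact ⟨v, rfl⟩
        rw [hv]
        have hkeys : (res.insert kv.1 v).keys = res.keys ++ [kv.1] :=
          PySem.Dict.keys_insert_of_not_contains _ _ hmem'
        have hsz : (res.insert kv.1 v).size = res.size + 1 := by
          simp [PySem.Dict.size, PySem.Dict.items_insert_of_not_contains res v hmem']
        have hndr' : (res.insert kv.1 v).keys.Nodup := by
          rw [hkeys]
          refine List.Nodup.append hndr (List.nodup_singleton _) ?_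
          intro x hx hx1
          rw [List.mem_singleton] at hx1
          subst hx1
          rw [PySem.Dict.contains_eq_decide_mem_keys] at hmem'
          simpa [hx] using hmem'
        have harith : max_keys - ((res.insert kv.1 v).size : Int)
            = max_keys - (res.size : Int) - 1 := by rw [hsz]; push_cast; ring
        have := ih (res.insert kv.1 v) hcL hndL' hndr'
        rw [harith] at this
        rw [this]
        have hfilt : (L.map Prod.fst).filter (fun k => !(res.insert kv.1 v).contains k)
            = (L.map Prod.fst).filter (fun k => !res.contains k) := by
          apply List.filter_congr
          intro x hx
          have hxne : x ≠ kv.1 := fun hxe => hkL (hxe ▸ hx)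
          simp [PySem.Dict.contains_insert, hxne]
        have htake : max_keys.toNat - res.size = (max_keys.toNat - (res.size + 1)) + 1 := by omega
        rw [PySem.Dict.items_insert_of_not_contains res v hmem', hfilt, hsz]
        simp [List.filter_cons, hmem', htake, pvBuild, PySem.Dict.getD_of_get?_eq_some _ _ hv]
      · rw [if_neg (fun h => hrem h.2)]
        have ht : max_keys.toNat - res.size = 0 := by omega
        rw [ih res hcL hndL' hndr]
        simp [ht, pvBuild]

-- ===== VERDICT (by name: the statement is the Claim_ definition above) =====
theorem truncate_dict_spec : Claim_equal_truncate_dict := by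
  intro d max_keys _hdom hpre
  unfold Spec_truncate_dict
  by_cases hle : (d.length : Int) ≤ max_keys
  · simp [truncate_dict, truncate_dict_alt, hle]
  · simp only [truncate_dict, truncate_dict_alt, if_neg hle]
    set dd : PySem.Dict String String := PySem.Dict.mk d with hdd
    set pk : List String := ["id", "name", "type", "label", "value", "score", "confidence"] with hpk
    set pp : List String := pk.filter (fun k => dd.contains k) with hpp
    set others : List String := dd.keys.filter (fun k => !pk.contains k) with hoth
    have hkeysd : dd.keys = d.map Prod.fst := rfl
    have hnd : dd.keys.Nodup := by rw [hkeysd]; exact hpre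
    have hpknd : pk.Nodup := by decide
    have hppnd : pp.Nodup := List.Nodup.filter _ hpknd
    have hcontk : ∀ x ∈ dd.keys, dd.contains x = true := by
      intro x hx
      rw [PySem.Dict.contains_eq_decide_mem_keys]
      simpa using hx
    -- the sort key
    set rank : PySem.Dict String Int :=
      PySem.Dict.mk ((PySem.List.enumerate pk).map (fun p => (p.2, p.1))) with hrank
    set pos : PySem.Dict String Int :=
      PySem.Dict.mk ((PySem.List.enumerate d).map (fun p => (p.2.1, p.1))) with hposd
    set key : String → Int :=
      (fun k => rank.getD k ((pk.length : Int) + pos.getD k 0)) with hkey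
    -- key values: priority keys rank at their index in pk
    have hkeyP : ∀ k ∈ pk, key k = (pk.idxOf k : Int) := by
      intro k hk
      have h := pvEnumGet (fun x => x) pk 0 k (by simpa using hpknd) (by simpa using hk)
      simp only [List.map_id'] at h
      simp [hkey, PySem.Dict.getD, hrank, h]
    -- key values: other keys of d rank after all priority keys, in d order
    have hkeyO : ∀ k ∈ dd.keys, k ∉ pk → key k = (pk.length : Int) + (dd.keys.idxOf k : Int) := by
      intro k hk hknp
      have hr := pvEnumGetNone (fun x => x) pk 0 k (by simpa using hknp)
      have hp := pvEnumGet (fun x : String × String => x.1) d 0 k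
        (by simpa [hkeysd] using hnd) (by simpa [← hkeysd] using hk)
      simp only [zero_add] at hp
      have hmf : d.map (fun x : String × String => x.1) = dd.keys := rfl
      rw [hmf] at hp
      simp [hkey, PySem.Dict.getD, hrank, hposd, hr, hp]
    -- the sorted order is pp ++ others
    have hOrdNd : (pp ++ others).Nodup := by
      refine List.Nodup.append hppnd (hnd.filter _) ?_
      intro x hxp hxo
      have h1 : x ∈ pk := (List.mem_filter.mp hxp).1
      have h2 : ¬(pk.contains x = true) := by simpa using (List.mem_filter.mp hxo).2
      exact h2 (List.contains_iff_mem.mpr h1)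
    have hperm : (pp ++ others).Perm dd.keys := by
      have h1 : pp.Perm (dd.keys.filter (fun k => pk.contains k)) := by
        apply List.perm_of_nodup_nodup_toFinset_eq hppnd (hnd.filter _)
        apply Finset.ext
        intro x
        simp only [List.mem_toFinset, hpp, List.mem_filter]
        constructor
        · rintro ⟨hxpk, hxc⟩
          rw [PySem.Dict.contains_eq_decide_mem_keys] at hxc
          exact ⟨by simpa using hxc, List.contains_iff_mem.mpr hxpk⟩
        · rintro ⟨hxk, hxpk⟩
          refine ⟨List.contains_iff_mem.mp hxpk, ?_⟩
          rw [PySem.Dict.contains_eq_decide_mem_keys]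
          simpa using hxk
      have h2 : (dd.keys.filter (fun k => pk.contains k)
          ++ dd.keys.filter (fun k => !pk.contains k)).Perm dd.keys :=
        List.filter_append_perm _ _
      exact (h1.append_right others).trans h2
    have hpw : (pp ++ others).Pairwise (fun a b => key a < key b) := by
      rw [List.pairwise_append]
      refine ⟨?_, ?_, ?_⟩
      · refine ((pvPairwiseIdxOf pk hpknd).sublist List.filter_sublist).imp_of_mem ?_
        intro a b ha hb h
        rw [hkeyP a (List.mem_of_mem_filter ha), hkeyP b (List.mem_of_mem_filter hb)]
        exact_mod_cast h
      · refine ((pvPairwiseIdxOf dd.keys hnd).sublist List.filter_sublist).imp_of_mem ?_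
        intro a b ha hb h
        have hak := List.mem_of_mem_filter ha
        have hbk := List.mem_of_mem_filter hb
        have hanp : a ∉ pk := by
          have := (List.mem_filter.mp ha).2
          simpa [List.contains_iff_mem] using this
        have hbnp : b ∉ pk := by
          have := (List.mem_filter.mp hb).2
          simpa [List.contains_iff_mem] using this
        rw [hkeyO a hak hanp, hkeyO b hbk hbnp]
        omega
      · intro a ha b hb
        have hapk : a ∈ pk := List.mem_of_mem_filter ha
        have hbk := List.mem_of_mem_filter hb
        have hbnp : b ∉ pk := by
          have := (List.mem_filter.mp hb).2
          simpa [List.contains_iff_mem] using this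
        rw [hkeyP a hapk, hkeyO b hbk hbnp]
        have halt : pk.idxOf a < pk.length := List.idxOf_lt_length_of_mem hapk
        omega
    have hsorted : PySem.List.sorted dd.keys key = pp ++ others :=
      PySem.List.sorted_eq_of_perm_of_pairwise_lt dd.keys (pp ++ others) key hperm hpw
    -- B's kept keys
    have hmx : (0 : Int) ≤ max max_keys 0 := le_max_right _ _
    have htn : (max max_keys 0).toNat = max_keys.toNat := by omega
    have hkeep : PySem.List.slice (PySem.List.sorted dd.keys key) none (some (max max_keys 0))
        = (pp ++ others).take max_keys.toNat := by
      rw [PySem.List.slice_to _ hmx, htn, hsorted]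
    -- characterise A's first loop
    have hR1 := pvPhase1 dd max_keys pk PySem.Dict.empty (by simpa using hppnd)
    set R1 : PySem.Dict String String := pk.foldl (fun result key =>
        if dd.contains key = true ∧ (result.size : Int) < max_keys then
          match dd.get? key with
          | some v => result.insert key v
          | none => result
        else result) PySem.Dict.empty with hR1def
    simp only [PySem.Dict.size, PySem.Dict.items, PySem.Dict.empty] at hR1
    rw [List.nil_append] at hR1
    have hR1items : R1.items = pvBuild dd (pp.take max_keys.toNat) := by simpa using hR1
    have hR1keys : R1.keys = pp.take max_keys.toNat := by
      show R1.items.map Prod.fst = _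
      simp [hR1items, pvBuild, Function.comp_def]
    have hR1size : R1.size = min max_keys.toNat pp.length := by
      show R1.items.length = _
      simp [hR1items, pvBuild]
    -- characterise A's second loop
    have hA := pvPhase2 dd max_keys d R1
      (fun kv hkv => hcontk kv.1 (by rw [hkeysd]; exact List.mem_map_of_mem hkv))
      hpre (by rw [hR1keys]; exact hppnd.take)
    -- characterise B's dict comprehension
    have hOrd : ∀ k ∈ (pp ++ others).take max_keys.toNat, dd.contains k = true := by
      intro k hk
      have hk' := List.mem_of_mem_take hk
      rcases List.mem_append.mp hk' with h | h
      · exact (List.mem_filter.mp h).2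
      · exact hcontk k (List.mem_filter.mp h).1
    have hB := pvFillAll dd ((pp ++ others).take max_keys.toNat) PySem.Dict.empty hOrd
      (by simpa using hOrdNd.take)
    rw [hkeep] at *
    rw [hA, hB, hR1items]
    have heit : (PySem.Dict.empty : PySem.Dict String String).items = [] := rfl
    rw [heit, List.nil_append]
    have hsplit : (pp ++ others).take max_keys.toNat = pp.take max_keys.toNat ++ others.take (max_keys.toNat - pp.length) :=
      List.take_append
    rw [hsplit]
    simp only [pvBuild, List.map_append]
    congr 1
    by_cases hcase : max_keys.toNat ≤ pp.length
    · have h1 : max_keys.toNat - R1.size = 0 := by rw [hR1size]; omega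
      have h2 : max_keys.toNat - pp.length = 0 := by omega
      simp [h1, h2]
    · have hsz2 : max_keys.toNat - R1.size = max_keys.toNat - pp.length := by rw [hR1size]; omega
      have hppt : pp.take max_keys.toNat = pp := List.take_of_length_le (by omega)
      have hfeq : (d.map Prod.fst).filter (fun k => !R1.contains k)
          = dd.keys.filter (fun k => !pk.contains k) := by
        rw [← hkeysd]
        apply List.filter_congr
        intro x hx
        have hxc : dd.contains x = true := hcontk x hx
        rw [PySem.Dict.contains_eq_decide_mem_keys, hR1keys, hppt]
        by_cases hxpk : x ∈ pk
        · simp [hpp, List.mem_filter, hxpk, hxc, List.contains_iff_mem.mpr hxpk]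
        · have : ¬ (pk.contains x = true) := by
            intro hcc; exact hxpk (List.contains_iff_mem.mp hcc)
          simp [hpp, List.mem_filter, hxpk, Bool.not_eq_true _ ▸ this]
      rw [hfeq, hsz2]
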